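-- pv_equiv track=rewrite | github.com/MustafaYounes1/py_w3resource | 037_advanced_data_types_None/007.py | count_nones
-- ===== SOURCE A (Python) =====
-- def count_nones(lst: list[...]) -> int:
--     if not lst:
--         return 0
--
--     head, *tail = lst
--
--     if head is None:
--         return 1 + count_nones(tail)
--
--     else:
--         return count_nones(tail)
-- ===== SOURCE B (Python) =====
-- def count_nones(lst):
--     count = 0
--     for x in lst:
--         if x is None:
--             count += 1
--     return count
-- ===== Notes on version B (the rewrite author's own statement) =====
-- stated objective: faster
-- what changed: Replaces the head/tail recursion (whose `head, *tail = lst` copies the tail on every call) with a single iterative pass keeping a counter accumulator.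
import Mathlib
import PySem

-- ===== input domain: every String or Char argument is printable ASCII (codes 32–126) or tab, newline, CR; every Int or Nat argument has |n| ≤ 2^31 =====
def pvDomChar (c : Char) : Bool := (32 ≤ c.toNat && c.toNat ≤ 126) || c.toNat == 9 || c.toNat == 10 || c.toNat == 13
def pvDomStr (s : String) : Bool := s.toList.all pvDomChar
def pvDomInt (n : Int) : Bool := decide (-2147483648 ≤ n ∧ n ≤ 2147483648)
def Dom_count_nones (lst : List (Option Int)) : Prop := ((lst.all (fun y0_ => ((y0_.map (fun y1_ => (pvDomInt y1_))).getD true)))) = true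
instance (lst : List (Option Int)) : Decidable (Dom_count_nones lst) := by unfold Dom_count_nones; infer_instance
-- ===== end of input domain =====

-- B replaces A's head/tail recursion by one iterative pass with a counter (simpler decomposition).

-- ===== PORT A =====
def count_nones (lst : List (Option Int)) : Int :=
  match lst with
  | [] => 0
  | head :: tail =>
    if head = none then 1 + count_nones tail
    else count_nones tail

-- ===== PORT B =====
def count_nones_alt (lst : List (Option Int)) : Int :=
  lst.foldl (fun count x => if x = none then count + 1 else count) 0

-- ===== PRECONDITION & SPEC =====
def Spec_count_nones (lst : List (Option Int)) (out : Int) : Prop := out = count_nones_alt lst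
instance (lst : List (Option Int)) (out : Int) : Decidable (Spec_count_nones lst out) := by unfold Spec_count_nones; infer_instance

-- ===== CLAIM (what is proved, stated in full; the proofs are below) =====
def Claim_equal_count_nones : Prop := ∀ (lst : List (Option Int)), Dom_count_nones lst → Spec_count_nones lst (count_nones lst)

-- ===== LEMMAS AND PROOFS =====
theorem count_nones_foldl_shift (lst : List (Option Int)) (c : Int) :
    lst.foldl (fun count x => if x = none then count + 1 else count) c = c + count_nones lst := by
  induction lst generalizing c with
  | nil => simp [count_nones]
  | cons h t ih =>
    simp only [List.foldl, count_nones]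
    by_cases hx : h = none <;> simp [hx, ih] <;> ring

-- ===== VERDICT (by name: the statement is the Claim_ definition above) =====
theorem count_nones_spec : Claim_equal_count_nones := by
  intro lst _
  unfold Spec_count_nones count_nones_alt
  rw [count_nones_foldl_shift]
  ring
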